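-- pv_equiv track=rewrite | github.com/0xUnite/binance-ai-assistant | utils/dump_detective.py | _final_rating
-- ===== SOURCE A (Python) =====
-- from typing import Dict, Any, List, Optional
--
-- def _final_rating(signals: List[str]) -> str:
--     red = sum(1 for s in signals if s == "RED")
--     yellow = sum(1 for s in signals if s == "YELLOW")
--     if red >= 3:
--         return "HIGH"
--     if red >= 1 or yellow >= 2:
--         return "MEDIUM-HIGH"
--     return "LOW"
-- ===== SOURCE B (Python) =====
-- from typing import List
--
-- def _final_rating(signals: List[str]) -> str:
--     red = 0
--     yellow = 0
--     for s in signals: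
--         if s == "RED":
--             red += 1
--             if red >= 3:
--                 return "HIGH"
--         elif s == "YELLOW":
--             yellow += 1
--     if red >= 1 or yellow >= 2:
--         return "MEDIUM-HIGH"
--     return "LOW"
-- ===== Notes on version B (the rewrite author's own statement) =====
-- stated objective: alternative
-- what changed: Replaces A's two staged filtering scans plus post-hoc threshold checks with a single pass that maintains both counters in one accumulator and returns HIGH early the moment the third RED is seen, deciding the remaining verdict only at list end.
import Mathlib
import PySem

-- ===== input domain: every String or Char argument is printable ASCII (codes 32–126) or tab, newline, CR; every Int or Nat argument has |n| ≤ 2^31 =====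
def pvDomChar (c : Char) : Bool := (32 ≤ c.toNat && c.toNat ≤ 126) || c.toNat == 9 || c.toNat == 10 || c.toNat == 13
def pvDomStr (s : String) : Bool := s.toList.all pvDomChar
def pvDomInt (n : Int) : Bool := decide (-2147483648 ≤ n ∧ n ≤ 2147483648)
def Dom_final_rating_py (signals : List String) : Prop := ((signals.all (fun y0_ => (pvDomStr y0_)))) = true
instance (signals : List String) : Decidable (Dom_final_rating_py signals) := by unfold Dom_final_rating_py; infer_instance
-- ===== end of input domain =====

-- B replaces A's two staged scans with one single pass keeping both counters and returning "HIGH" early at the third RED (alternative decomposition, same cost).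


-- ===== PORT A =====
-- red = sum(1 for s in signals if s == "RED"); yellow likewise: two separate scans, then the threshold cascade.
def final_rating_py (signals : List String) : String :=
  let red : Int := signals.foldl (fun acc s => if s == "RED" then acc + 1 else acc) 0
  let yellow : Int := signals.foldl (fun acc s => if s == "YELLOW" then acc + 1 else acc) 0
  if red ≥ 3 then "HIGH"
  else if red ≥ 1 ∨ yellow ≥ 2 then "MEDIUM-HIGH"
  else "LOW"

-- ===== PORT B =====
-- single loop over the list carrying both counters; immediate "HIGH" on the third RED; verdict at the end otherwise.
def final_rating_py_altLoop : List String → Int → Int → String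
  | [], red, yellow =>
      if red ≥ 1 ∨ yellow ≥ 2 then "MEDIUM-HIGH" else "LOW"
  | s :: rest, red, yellow =>
      if s == "RED" then
        if red + 1 ≥ 3 then "HIGH" else final_rating_py_altLoop rest (red + 1) yellow
      else if s == "YELLOW" then final_rating_py_altLoop rest red (yellow + 1)
      else final_rating_py_altLoop rest red yellow

def final_rating_py_alt (signals : List String) : String :=
  final_rating_py_altLoop signals 0 0

-- ===== PRECONDITION & SPEC =====
def Spec_final_rating_py (signals : List String) (out : String) : Prop := out = final_rating_py_alt signals
instance (signals : List String) (out : String) : Decidable (Spec_final_rating_py signals out) := by unfold Spec_final_rating_py; infer_instance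

-- ===== CLAIM (what is proved, stated in full; the proofs are below) =====
def Claim_equal_final_rating_py : Prop := ∀ (signals : List String), Dom_final_rating_py signals → Spec_final_rating_py signals (final_rating_py signals)

-- ===== LEMMAS AND PROOFS =====
theorem pv_foldl_count (v : String) (l : List String) (acc : Int) :
    l.foldl (fun acc s => if s == v then acc + 1 else acc) acc = acc + l.count v := by
  induction l generalizing acc with
  | nil => simp
  | cons x xs ih =>
    simp only [List.foldl_cons, List.count_cons, ih]
    by_cases h : x == v <;> simp [h] <;> ring

-- the loop computes the cascade on the FINAL counts, given that "HIGH" was not yet triggered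
theorem pv_altLoop_eq (l : List String) (red yellow : Int) (h : red < 3) :
    final_rating_py_altLoop l red yellow =
      (if red + (l.count "RED" : Int) ≥ 3 then "HIGH"
       else if red + (l.count "RED" : Int) ≥ 1 ∨ yellow + (l.count "YELLOW" : Int) ≥ 2 then "MEDIUM-HIGH"
       else "LOW") := by
  induction l generalizing red yellow with
  | nil =>
    have h3 : ¬ red ≥ 3 := by omega
    simp only [final_rating_py_altLoop, List.count_nil, Nat.cast_zero, add_zero]
    split_ifs <;> simp_all
  | cons x xs ih =>
    by_cases hr : x == "RED"
    · simp only [final_rating_py_altLoop, hr, if_pos]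
      have hx : (x :: xs).count "RED" = xs.count "RED" + 1 := by
        simp [List.count_cons, hr]
      have hy : (x :: xs).count "YELLOW" = xs.count "YELLOW" := by
        have : ¬ (x == "YELLOW") := by
          intro hc
          rw [beq_iff_eq] at hr hc
          simp [hr] at hc
        simp [List.count_cons, this]
      by_cases h3 : red + 1 ≥ 3
      · have : red + ((x :: xs).count "RED" : Int) ≥ 3 := by
          rw [hx]; push_cast; omega
        simp [h3, this]
      · rw [if_neg h3, ih (red + 1) yellow (by omega), hx, hy]
        push_cast
        have e1 : red + 1 + (xs.count "RED" : Int) = red + ((xs.count "RED" : Int) + 1) := by ring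
        rw [e1]
    · have hxr : ¬ (x == "RED") = true := by simp [hr]
      have hx : (x :: xs).count "RED" = xs.count "RED" := by
        simp [List.count_cons, hr]
      by_cases hyel : x == "YELLOW"
      · have hy : (x :: xs).count "YELLOW" = xs.count "YELLOW" + 1 := by
          simp [List.count_cons, hyel]
        simp only [final_rating_py_altLoop, hxr, hyel, if_pos]
        rw [ih red (yellow + 1) h, hx, hy]
        push_cast
        have e1 : yellow + 1 + (xs.count "YELLOW" : Int) = yellow + ((xs.count "YELLOW" : Int) + 1) := by ring
        rw [e1]
      · have hxy : ¬ (x == "YELLOW") = true := by simp [hyel]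
        have hy : (x :: xs).count "YELLOW" = xs.count "YELLOW" := by
          simp [List.count_cons, hyel]
        simp only [final_rating_py_altLoop]
        rw [if_neg hxr, if_neg hxy, ih red yellow h, hx, hy]

-- ===== VERDICT (by name: the statement is the Claim_ definition above) =====
theorem final_rating_py_spec : Claim_equal_final_rating_py := by
  intro signals _
  unfold Spec_final_rating_py final_rating_py final_rating_py_alt
  rw [pv_altLoop_eq signals 0 0 (by omega)]
  simp only [pv_foldl_count, zero_add]
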